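-- pv_equiv track=rewrite | github.com/Jaxsbr/garden_gardians | app/utils/generate_layers.py | generate_mixed_case_alphabet_array_with_format
-- ===== SOURCE A (Python) =====
-- def generate_mixed_case_alphabet_array_with_format(max_size, start_char, layer_name):
--     # Create a combined list of uppercase and lowercase letters
--     alphabet = [chr(i) for i in range(ord('A'), ord('Z') + 1)] + [chr(i) for i in range(ord('a'), ord('z') + 1)]
--     alphabet_size = len(alphabet)
--
--     # Calculate the starting index in the alphabet array
--     start_index = alphabet.index(start_char)
--
--     # Create the formatted output
--     result = f"\t{layer_name} = [\n"
--     for i in range(max_size):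
--         row = []
--         for j in range(max_size):
--             # Calculate the character with the shift applied
--             char_index = (start_index + i + j) % alphabet_size  # Wrap around the entire alphabet list
--             row.append(alphabet[char_index])
--         result += f"\t    {row},\n"
--     result += "\t]"
--     return result
-- ===== SOURCE B (Python) =====
-- def generate_mixed_case_alphabet_array_with_format(max_size, start_char, layer_name):
--     alphabet = [chr(i) for i in range(ord('A'), ord('Z') + 1)] + [chr(i) for i in range(ord('a'), ord('z') + 1)]
--     start_index = alphabet.index(start_char)
--     # a pre-built table long enough for every row; no per-cell modulo needed
--     reps = (start_index + 2 * max(max_size, 0)) // 52 + 1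
--     extended = alphabet * reps
--     rows = [f"\t    {extended[start_index + i : start_index + i + max_size]},\n" for i in range(max_size)]
--     return f"\t{layer_name} = [\n" + "".join(rows) + "\t]"
-- ===== Notes on version B (the rewrite author's own statement) =====
-- stated objective: simpler
-- what changed: B precomputes one repeated-alphabet table and builds each row by slicing it, joining the row strings at the end, instead of A's nested loop with a per-cell modulo and string accumulation.
-- outside the precondition, e.g. on generate_mixed_case_alphabet_array_with_format(2, '?', 'L'): A raises ValueError, B raises ValueError
import Mathlib
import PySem

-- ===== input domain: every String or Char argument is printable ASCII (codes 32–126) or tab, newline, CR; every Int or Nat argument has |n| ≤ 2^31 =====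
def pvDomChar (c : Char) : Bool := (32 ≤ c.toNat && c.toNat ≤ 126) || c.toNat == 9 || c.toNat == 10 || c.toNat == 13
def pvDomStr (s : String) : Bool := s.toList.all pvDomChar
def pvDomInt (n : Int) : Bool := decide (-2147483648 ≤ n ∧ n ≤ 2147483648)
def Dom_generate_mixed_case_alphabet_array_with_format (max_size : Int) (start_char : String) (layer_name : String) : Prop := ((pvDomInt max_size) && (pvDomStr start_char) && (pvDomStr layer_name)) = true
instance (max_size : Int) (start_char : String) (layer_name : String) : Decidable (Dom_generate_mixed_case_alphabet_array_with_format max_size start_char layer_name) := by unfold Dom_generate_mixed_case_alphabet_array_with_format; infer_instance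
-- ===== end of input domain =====

-- B replaces A's per-cell modulo inner loop by slicing one prebuilt repeated-alphabet table (simpler decomposition; return value only).

-- ===== PORT A =====
-- the 52-letter mixed-case alphabet both Pythons build the same way
def pvAlphabet : List String :=
  (PySem.List.pyRange 65 91 1).map (fun i => (Char.ofNat i.toNat).toString)
    ++ (PySem.List.pyRange 97 123 1).map (fun i => (Char.ofNat i.toNat).toString)

-- f"{row}" for a list of single-letter strings; exact there (letters need no escaping, [] prints '[]')
def pvFmtRow (row : List String) : String :=
  "[" ++ PySem.Str.join ", " (row.map (fun c => "'" ++ c ++ "'")) ++ "]"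

def generate_mixed_case_alphabet_array_with_format (max_size : Int) (start_char : String) (layer_name : String) : String :=
  match PySem.List.index? pvAlphabet start_char with
  | none => ""   -- Python raises ValueError here; excluded by Pre_
  | some start_index =>
    let result := "\t" ++ layer_name ++ " = [\n"
    let result := (PySem.List.pyRange 0 max_size 1).foldl (fun result i =>
      let row := (PySem.List.pyRange 0 max_size 1).foldl (fun row j =>
        row ++ [PySem.List.pyGetD pvAlphabet
          (PySem.Int.mod ((start_index : Int) + i + j) (pvAlphabet.length : Int)) ""]) []
      result ++ ("\t    " ++ pvFmtRow row ++ ",\n")) result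
    result ++ "\t]"

-- ===== PORT B =====
def generate_mixed_case_alphabet_array_with_format_alt (max_size : Int) (start_char : String) (layer_name : String) : String :=
  match PySem.List.index? pvAlphabet start_char with
  | none => ""   -- Python raises ValueError here; excluded by Pre_
  | some start_index =>
    let reps : Int := PySem.Int.floordiv ((start_index : Int) + 2 * max max_size 0) 52 + 1
    let extended := (List.replicate reps.toNat pvAlphabet).flatten
    let rows := (PySem.List.pyRange 0 max_size 1).map (fun i =>
      "\t    " ++ pvFmtRow (PySem.List.slice extended
        (some ((start_index : Int) + i)) (some ((start_index : Int) + i + max_size))) ++ ",\n")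
    "\t" ++ layer_name ++ " = [\n" ++ PySem.Str.join "" rows ++ "\t]"

-- ===== PRECONDITION & SPEC =====
-- Pre_ excludes exactly the inputs where Python A raises ValueError: start_char not one of the 52 letter strings.
def Pre_generate_mixed_case_alphabet_array_with_format (max_size : Int) (start_char : String) (layer_name : String) : Prop :=
  start_char ∈ pvAlphabet
instance (max_size : Int) (start_char : String) (layer_name : String) : Decidable (Pre_generate_mixed_case_alphabet_array_with_format max_size start_char layer_name) := by unfold Pre_generate_mixed_case_alphabet_array_with_format; infer_instance
def pvWitness_generate_mixed_case_alphabet_array_with_format : Int × String × String := (3, "C", "layer")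

def Spec_generate_mixed_case_alphabet_array_with_format (max_size : Int) (start_char : String) (layer_name : String) (out : String) : Prop := out = generate_mixed_case_alphabet_array_with_format_alt max_size start_char layer_name
instance (max_size : Int) (start_char : String) (layer_name : String) (out : String) : Decidable (Spec_generate_mixed_case_alphabet_array_with_format max_size start_char layer_name out) := by unfold Spec_generate_mixed_case_alphabet_array_with_format; infer_instance

-- ===== CLAIM (what is proved, stated in full; the proofs are below) =====
def Claim_equal_generate_mixed_case_alphabet_array_with_format : Prop := ∀ (max_size : Int) (start_char : String) (layer_name : String), Dom_generate_mixed_case_alphabet_array_with_format max_size start_char layer_name → Pre_generate_mixed_case_alphabet_array_with_format max_size start_char layer_name → Spec_generate_mixed_case_alphabet_array_with_format max_size start_char layer_name (generate_mixed_case_alphabet_array_with_format max_size start_char layer_name)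

-- ===== LEMMAS AND PROOFS =====
theorem pvAlphabet_length : pvAlphabet.length = 52 := rfl

theorem pv_flat_length (k : Nat) : ((List.replicate k pvAlphabet).flatten).length = k * 52 := by
  induction k with
  | zero => rfl
  | succ k ih =>
    rw [List.replicate_succ, List.flatten_cons, List.length_append, ih, pvAlphabet_length]
    ring

theorem pv_flat_getD (k m : Nat) (h : m < k * 52) :
    ((List.replicate k pvAlphabet).flatten).getD m "" = pvAlphabet.getD (m % 52) "" := by
  induction k generalizing m with
  | zero => omega
  | succ k ih =>
    rw [List.replicate_succ, List.flatten_cons]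
    by_cases hm : m < 52
    · rw [List.getD_append _ _ _ _ (by rw [pvAlphabet_length]; omega), Nat.mod_eq_of_lt hm]
    · rw [List.getD_append_right _ _ _ _ (by rw [pvAlphabet_length]; omega), pvAlphabet_length,
        ih (m - 52) (by omega)]
      congr 1
      omega

theorem pv_take_drop (k a N : Nat) (h : a + N ≤ k * 52) :
    (((List.replicate k pvAlphabet).flatten).drop a).take N
      = (List.range N).map (fun j => pvAlphabet.getD ((a + j) % 52) "") := by
  apply List.ext_getElem
  · rw [List.length_take, List.length_drop, pv_flat_length, List.length_map, List.length_range]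
    omega
  · intro i h1 h2
    simp only [List.getElem_take, List.getElem_drop, List.getElem_map, List.getElem_range]
    have hlen : a + i < ((List.replicate k pvAlphabet).flatten).length := by
      rw [pv_flat_length]
      rw [List.length_map, List.length_range] at h2
      omega
    rw [← List.getD_eq_getElem _ "" hlen, pv_flat_getD k (a + i) (by rw [pv_flat_length] at hlen; omega)]

theorem pv_flatten_intersperse_nil (xs : List (List Char)) :
    (List.intersperse ([] : List Char) xs).flatten = xs.flatten := by
  induction xs with
  | nil => rfl
  | cons a l ih =>
    cases l with
    | nil => rfl
    | cons b m =>
      rw [List.intersperse_cons₂, List.flatten_cons, List.flatten_cons, List.flatten_cons, ih,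
        List.flatten_cons]
      simp

theorem pv_join_cons (a : String) (l : List String) :
    PySem.Str.join "" (a :: l) = a ++ PySem.Str.join "" l := by
  apply String.toList_inj.mp
  simp [PySem.Str.join, PySem.Chars.join, List.intercalate, pv_flatten_intersperse_nil]

theorem pv_foldl_strcat {α : Type} (l : List α) (g : α → String) (acc : String) :
    l.foldl (fun r x => r ++ g x) acc = acc ++ PySem.Str.join "" (l.map g) := by
  induction l generalizing acc with
  | nil =>
    apply String.toList_inj.mp
    simp [PySem.Str.join, PySem.Chars.join, List.intercalate]
  | cons a l ih => simp only [List.foldl_cons, List.map_cons, ih, pv_join_cons, String.append_assoc]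

theorem pv_row_eq (n : Int) (s : Nat) (i : Int) (hi : 0 ≤ i) (hin : i < n) :
    PySem.List.slice
        ((List.replicate (PySem.Int.floordiv ((s : Int) + 2 * max n 0) 52 + 1).toNat pvAlphabet).flatten)
        (some ((s : Int) + i)) (some ((s : Int) + i + n))
      = (PySem.List.pyRange 0 n 1).foldl (fun row j =>
          row ++ [PySem.List.pyGetD pvAlphabet
            (PySem.Int.mod ((s : Int) + i + j) (pvAlphabet.length : Int)) ""]) [] := by
  have hn : 0 < n := lt_of_le_of_lt hi hin
  obtain ⟨N, rfl⟩ : ∃ N : Nat, n = (N : Int) := ⟨n.toNat, by omega⟩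
  obtain ⟨ii, rfl⟩ : ∃ m : Nat, i = (m : Int) := ⟨i.toNat, by omega⟩
  have hiiN : ii < N := by exact_mod_cast hin
  -- right-hand side: the appending loop is a map over range
  rw [PySem.List.foldl_append_singleton_eq_map, PySem.List.pyRange_one]
  -- left-hand side: reduce floordiv, max, and the slice bounds to Nat
  have hmax : max ((N : Nat) : Int) 0 = ((N : Nat) : Int) := by omega
  rw [hmax, PySem.Int.floordiv_eq_ediv_of_pos (by norm_num)]
  have hreps : (((s : Int) + 2 * (N : Int)) / 52 + 1).toNat = (s + 2 * N) / 52 + 1 := by omega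
  have hb1 : (s : Int) + (ii : Int) = ((s + ii : Nat) : Int) := by push_cast; ring
  rw [hreps, hb1, PySem.List.slice_natCast_add]
  rw [pv_take_drop ((s + 2 * N) / 52 + 1) (s + ii) N (by omega)]
  have hsz : ((N : Int) - 0).toNat = N := by omega
  rw [hsz, List.map_map]
  simp only [List.nil_append]
  apply List.map_congr_left
  intro kk hk
  have hkN : kk < N := List.mem_range.mp hk
  simp only [Function.comp]
  have hmod : PySem.Int.mod (((s + ii : Nat) : Int) + (0 + (kk : Int))) ((pvAlphabet.length : Nat) : Int)
      = (((s + ii + kk) % 52 : Nat) : Int) := by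
    rw [pvAlphabet_length, PySem.Int.mod_eq_emod_of_pos (by norm_num)]
    push_cast
    omega
  rw [hmod, PySem.List.pyGetD_natCast]

-- ===== VERDICT (by name: the statement is the Claim_ definition above) =====
theorem generate_mixed_case_alphabet_array_with_format_spec : Claim_equal_generate_mixed_case_alphabet_array_with_format := by
  intro n sc ln _ hpre
  unfold Spec_generate_mixed_case_alphabet_array_with_format
  unfold generate_mixed_case_alphabet_array_with_format generate_mixed_case_alphabet_array_with_format_alt
  cases hs : PySem.List.index? pvAlphabet sc with
  | none => exact absurd hpre ((PySem.List.index?_eq_none_iff _ _).mp hs)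
  | some s =>
    simp only
    rw [pv_foldl_strcat]
    refine congrArg (fun z => ("\t" ++ ln ++ " = [\n") ++ PySem.Str.join "" z ++ "\t]") ?_
    apply List.map_congr_left
    intro i hi
    obtain ⟨hi0, hin⟩ := PySem.List.mem_pyRange_one.mp hi
    rw [← pv_row_eq n s i hi0 hin]
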